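-- pv_equiv track=rewrite | github.com/wilmurillo-ai/Design-Assistant | .skills/openclaw-skills/skills/sapereaude2014/model-pricing-sync/scripts/build_upload_csv.py | collect_run_vendor_keys
-- ===== SOURCE A (Python) =====
-- from typing import Any
--
-- def collect_run_vendor_keys(source_pages: list[dict[str, Any]]) -> set[str]:
--     keys: set[str] = set()
--     for row in source_pages:
--         for vendor_key in str(row.get("vendor_keys", "")).split(";"):
--             vendor_key = vendor_key.strip()
--             if vendor_key:
--                 keys.add(vendor_key)
--     return keys
-- ===== SOURCE B (Python) =====
-- def collect_run_vendor_keys(source_pages):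
--     # single character-level scan, no split()/strip(): tokens are built in a
--     # buffer; leading whitespace never enters the buffer, trailing whitespace
--     # is popped when the ';' delimiter (or end of string) is reached.
--     keys = set()
--     for row in source_pages:
--         buf = []
--         for ch in str(row.get("vendor_keys", "")) + ";":
--             if ch == ";":
--                 while buf and buf[-1].isspace():
--                     buf.pop()
--                 if buf:
--                     keys.add("".join(buf))
--                 buf = []
--             elif buf or not ch.isspace():
--                 buf.append(ch)
--     return keys
-- ===== Notes on version B (the rewrite author's own statement) =====
-- stated objective: alternative
-- what changed: Replaces the per-row split(';')/strip() pipeline with a single character-level scanner: one pass over each field's characters with an explicit token buffer, skipping leading whitespace on entry, popping trailing whitespace at each ';' delimiter, and adding the completed non-empty token to the set.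
import Mathlib
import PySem

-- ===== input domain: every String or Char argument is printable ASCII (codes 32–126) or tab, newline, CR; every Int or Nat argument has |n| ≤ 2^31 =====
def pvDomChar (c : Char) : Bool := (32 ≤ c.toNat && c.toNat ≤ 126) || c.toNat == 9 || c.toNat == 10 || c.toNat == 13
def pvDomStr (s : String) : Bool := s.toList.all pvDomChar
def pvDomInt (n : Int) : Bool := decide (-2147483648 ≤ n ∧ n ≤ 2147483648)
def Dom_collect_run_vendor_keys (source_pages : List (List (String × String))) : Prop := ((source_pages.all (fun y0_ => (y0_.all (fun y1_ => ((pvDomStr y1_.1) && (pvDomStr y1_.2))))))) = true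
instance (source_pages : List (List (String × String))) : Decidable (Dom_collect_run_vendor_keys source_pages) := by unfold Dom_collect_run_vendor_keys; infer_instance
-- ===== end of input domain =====

-- B replaces A's per-row split(';')/strip() pipeline with a single character-level
-- scanner (explicit token buffer, leading spaces skipped, trailing spaces popped at ';');
-- alternative decomposition, same cost.


-- ===== PORT A =====
def collect_run_vendor_keys (source_pages : List (List (String × String))) : List String :=
  source_pages.foldl (fun keys row =>
    ((PySem.Str.split? ((PySem.Dict.mk row).getD "vendor_keys" "") ";").getD []).foldl
      (fun keys vendor_key =>
        if PySem.Str.strip vendor_key ≠ "" then PySem.Set.add keys (PySem.Str.strip vendor_key)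
        else keys)
      keys)
    PySem.Set.empty

-- ===== PORT B =====
-- one step of Source B's inner character loop; the Python buffer `buf` (appended at the
-- end, popped from the end) is stored REVERSED, so append = cons and the trailing
-- whitespace pop loop = dropWhile at the head; "".join(buf) = String.ofList buf.reverse
def scanStep (st : PySem.Set String × List Char) (ch : Char) : PySem.Set String × List Char :=
  let (keys, buf) := st
  if ch = ';' then
    let buf' := buf.dropWhile PySem.Chars.isspace
    (if buf' ≠ [] then PySem.Set.add keys (String.ofList buf'.reverse) else keys, [])
  else if buf ≠ [] ∨ ¬ PySem.Chars.isspace ch then (keys, ch :: buf)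
  else (keys, buf)

def collect_run_vendor_keys_alt (source_pages : List (List (String × String))) : List String :=
  source_pages.foldl (fun keys row =>
    (((((PySem.Dict.mk row).getD "vendor_keys" "").toList ++ [';']).foldl
        scanStep (keys, ([] : List Char))).1))
    PySem.Set.empty

-- ===== PRECONDITION & SPEC =====
def Spec_collect_run_vendor_keys (source_pages : List (List (String × String))) (out : List String) : Prop := out = collect_run_vendor_keys_alt source_pages
instance (source_pages : List (List (String × String))) (out : List String) : Decidable (Spec_collect_run_vendor_keys source_pages out) := by unfold Spec_collect_run_vendor_keys; infer_instance

-- ===== CLAIM (what is proved, stated in full; the proofs are below) =====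
def Claim_equal_collect_run_vendor_keys : Prop := ∀ (source_pages : List (List (String × String))), Dom_collect_run_vendor_keys source_pages → Spec_collect_run_vendor_keys source_pages (collect_run_vendor_keys source_pages)

-- ===== LEMMAS AND PROOFS =====

-- prepend a char onto the first token
def consTok (c : Char) : List (List Char) → List (List Char)
  | [] => [[c]]
  | h :: t => (c :: h) :: t

-- splC s = s.split(';') for the single-character separator ';'
def splC : List Char → List (List Char)
  | [] => [[]]
  | c :: rest => if c = ';' then [] :: splC rest else consTok c (splC rest)

lemma splC_ne_nil (s : List Char) : splC s ≠ [] := by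
  cases s with
  | nil => simp [splC]
  | cons c rest =>
    simp only [splC]
    split
    · simp
    · cases h : splC rest <;> simp [consTok]

-- accumulator shape of splitOn.go
def consH (cur : List Char) : List (List Char) → List (List Char)
  | [] => [cur.reverse]
  | h :: t => (cur.reverse ++ h) :: t

lemma go_eq (l : List Char) : ∀ (fuel : Nat) (cur : List Char) (acc : List (List Char)),
    l.length ≤ fuel →
    PySem.Chars.splitOn.go [';'] fuel l cur acc = acc.reverse ++ consH cur (splC l) := by
  induction l with
  | nil =>
    intro fuel cur acc _
    cases fuel <;> simp [PySem.Chars.splitOn.go, splC, consH]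
  | cons c rest ih =>
    intro fuel cur acc hf
    cases fuel with
    | zero => simp at hf
    | succ fuel =>
      obtain ⟨h, t, hht⟩ : ∃ h t, splC rest = h :: t := by
        rcases e : splC rest with _ | ⟨h, t⟩
        · exact absurd e (splC_ne_nil rest)
        · exact ⟨h, t, rfl⟩
      by_cases hc : c = ';'
      · subst hc
        have hpre : List.isPrefixOf [';'] (';' :: rest) = true := by
          simp [List.isPrefixOf]
        simp only [PySem.Chars.splitOn.go, hpre, if_pos]
        have hdrop : List.drop [';'].length (';' :: rest) = rest := rfl
        rw [hdrop]
        rw [ih fuel [] (cur.reverse :: acc) (by simpa using Nat.le_of_succ_le_succ hf)]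
        have h1 : splC (';' :: rest) = [] :: splC rest := rfl
        rw [h1, hht]
        simp [consH]
      · have hpre : List.isPrefixOf [';'] (c :: rest) = false := by
          simp [List.isPrefixOf, Ne.symm hc]
        simp only [PySem.Chars.splitOn.go]
        rw [if_neg (by simp [hpre])]
        rw [ih fuel (c :: cur) acc (by simpa using Nat.le_of_succ_le_succ hf)]
        have h2 : splC (c :: rest) = (c :: h) :: t := by
          simp [splC, hc, hht, consTok]
        rw [h2, hht]
        simp [consH]

lemma splitOn_semi (s : List Char) : PySem.Chars.splitOn s [';'] = splC s := by
  unfold PySem.Chars.splitOn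
  rw [go_eq s (s.length + 1) [] [] (by omega)]
  rcases e : splC s with _ | ⟨h, t⟩
  · exact absurd e (splC_ne_nil s)
  · simp [consH]

-- stripped non-empty tokens, char level / string level
def goodC (ts : List (List Char)) : List (List Char) :=
  (ts.map PySem.Chars.strip).filter (fun t => t ≠ [])

def goodS (ts : List String) : List String :=
  (ts.map PySem.Str.strip).filter (fun t => t ≠ "")

lemma goodS_map (ts : List (List Char)) :
    goodS (ts.map String.ofList) = (goodC ts).map String.ofList := by
  unfold goodS goodC
  rw [List.map_map]
  have hcomp : (PySem.Str.strip ∘ String.ofList) = (String.ofList ∘ PySem.Chars.strip) := by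
    funext t; simp [PySem.Str.strip]
  rw [hcomp, ← List.map_map, List.filter_map]
  congr 1
  apply List.filter_congr
  intro t _
  simp [Function.comp]

-- the tokens A splits out of a string s
def splitS (s : String) : List String := (PySem.Str.split? s ";").getD []

lemma splitS_eq (s : String) : splitS s = (splC s.toList).map String.ofList := by
  simp [splitS, PySem.Str.split?, PySem.Chars.split?, splitOn_semi]

lemma goodS_cons_pos (t : String) (ts : List String) (h : PySem.Str.strip t = "") :
    goodS (t :: ts) = goodS ts := by
  simp [goodS, h]

lemma goodS_cons_neg (t : String) (ts : List String) (h : ¬ PySem.Str.strip t = "") :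
    goodS (t :: ts) = PySem.Str.strip t :: goodS ts := by
  simp [goodS, h]

-- A's inner loop is a Set.update with the good tokens
lemma inner_eq (ks : PySem.Set String) (toks : List String) :
    toks.foldl
      (fun keys vendor_key =>
        if PySem.Str.strip vendor_key ≠ "" then PySem.Set.add keys (PySem.Str.strip vendor_key)
        else keys)
      ks
    = PySem.Set.update ks (goodS toks) := by
  induction toks generalizing ks with
  | nil => simp [goodS, PySem.Set.update]
  | cons t ts ih =>
    rw [List.foldl_cons]
    by_cases h : PySem.Str.strip t = ""
    · rw [if_neg (by simp [h]), ih, goodS_cons_pos t ts h]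
    · rw [if_pos h, ih, goodS_cons_neg t ts h, PySem.Set.update_cons]

-- ---- B-side: the scanner characterised through splC ----

-- the buffer after feeding the chars of t into Source B's inner loop (buffer reversed)
def buildBuf : List Char → List Char → List Char
  | b, [] => b
  | b, c :: t => if b ≠ [] ∨ ¬ PySem.Chars.isspace c then buildBuf (c :: b) t else buildBuf b t

def emitTok (ks : PySem.Set String) (b t : List Char) : PySem.Set String :=
  let b' := (buildBuf b t).dropWhile PySem.Chars.isspace
  if b' ≠ [] then PySem.Set.add ks (String.ofList b'.reverse) else ks

def emitAll : PySem.Set String → List Char → List (List Char) → PySem.Set String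
  | ks, _, [] => ks
  | ks, b, t :: ts => emitAll (emitTok ks b t) [] ts

lemma buildBuf_chain (b : List Char) (c : Char) (t : List Char) :
    buildBuf b (c :: t) = buildBuf (buildBuf b [c]) t := by
  simp only [buildBuf]
  split <;> rfl

lemma emitTok_chain (ks : PySem.Set String) (b : List Char) (c : Char) (t : List Char) :
    emitTok ks b (c :: t) = emitTok ks (buildBuf b [c]) t := by
  unfold emitTok
  rw [buildBuf_chain]

lemma scanStep_semi (ks : PySem.Set String) (b : List Char) :
    scanStep (ks, b) ';' = (emitTok ks b [], []) := by
  simp [scanStep, emitTok, buildBuf]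

lemma scan_eq (cs : List Char) : ∀ (ks : PySem.Set String) (b : List Char),
    (cs ++ [';']).foldl scanStep (ks, b) = (emitAll ks b (splC cs), []) := by
  induction cs with
  | nil =>
    intro ks b
    rw [List.nil_append, List.foldl_cons, List.foldl_nil, scanStep_semi]
    rfl
  | cons c rest ih =>
    intro ks b
    by_cases hc : c = ';'
    · subst hc
      rw [List.cons_append, List.foldl_cons, scanStep_semi, ih]
      have h1 : splC (';' :: rest) = [] :: splC rest := by simp [splC]
      rw [h1]
      rfl
    · obtain ⟨h, t, hht⟩ : ∃ h t, splC rest = h :: t := by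
        rcases e : splC rest with _ | ⟨h, t⟩
        · exact absurd e (splC_ne_nil rest)
        · exact ⟨h, t, rfl⟩
      have hstep : scanStep (ks, b) c = (ks, buildBuf b [c]) := by
        simp only [scanStep, buildBuf]
        rw [if_neg hc]
        split <;> rfl
      rw [List.cons_append, List.foldl_cons, hstep, ih]
      have hspl : splC (c :: rest) = (c :: h) :: t := by
        simp [splC, hc, hht, consTok]
      rw [hspl, hht]
      simp only [emitAll]
      rw [emitTok_chain]

lemma buildBuf_append (b : List Char) (hb : b ≠ []) (t : List Char) :
    buildBuf b t = t.reverse ++ b := by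
  induction t generalizing b with
  | nil => simp [buildBuf]
  | cons c t ih =>
    simp only [buildBuf]
    rw [if_pos (Or.inl hb), ih (c :: b) (by simp)]
    simp

lemma buildBuf_nil (t : List Char) :
    buildBuf [] t = (t.dropWhile PySem.Chars.isspace).reverse := by
  induction t with
  | nil => rfl
  | cons c t ih =>
    by_cases hsp : PySem.Chars.isspace c
    · simp only [buildBuf]
      rw [if_neg (by simp [hsp]), ih, List.dropWhile_cons_of_pos hsp]
    · simp only [buildBuf]
      rw [if_pos (Or.inr hsp), buildBuf_append [c] (by simp) t,
          List.dropWhile_cons_of_neg hsp]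
      simp

lemma emitTok_nil (ks : PySem.Set String) (t : List Char) :
    emitTok ks [] t =
      if PySem.Chars.strip t ≠ [] then PySem.Set.add ks (String.ofList (PySem.Chars.strip t))
      else ks := by
  unfold emitTok
  rw [buildBuf_nil]
  have hb' : (t.dropWhile PySem.Chars.isspace).reverse.dropWhile PySem.Chars.isspace
      = (PySem.Chars.strip t).reverse := by
    simp [PySem.Chars.strip, PySem.Chars.rstrip, PySem.Chars.lstrip]
  rw [hb']
  simp

lemma emitAll_nil (ts : List (List Char)) : ∀ (ks : PySem.Set String),
    emitAll ks [] ts = PySem.Set.update ks ((goodC ts).map String.ofList) := by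
  induction ts with
  | nil => intro ks; simp [emitAll, PySem.Set.update, goodC]
  | cons t ts ih =>
    intro ks
    simp only [emitAll]
    rw [ih, emitTok_nil]
    by_cases h : PySem.Chars.strip t = []
    · rw [if_neg (by simp [h])]
      simp [goodC, h]
    · rw [if_pos h]
      have hg : goodC (t :: ts) = PySem.Chars.strip t :: goodC ts := by
        simp [goodC, h]
      rw [hg, List.map_cons, PySem.Set.update_cons]

-- both per-row updates coincide
lemma row_eq (ks : PySem.Set String) (s : String) :
    (s.toList ++ [';']).foldl scanStep (ks, ([] : List Char))
      = (PySem.Set.update ks (goodS (splitS s)), []) := by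
  rw [scan_eq, emitAll_nil, splitS_eq, goodS_map]

-- ===== VERDICT (by name: the statement is the Claim_ definition above) =====
theorem collect_run_vendor_keys_spec : Claim_equal_collect_run_vendor_keys := by
  intro sp _
  unfold Spec_collect_run_vendor_keys collect_run_vendor_keys collect_run_vendor_keys_alt
  have hA : (fun (keys : PySem.Set String) (row : List (String × String)) =>
      ((PySem.Str.split? ((PySem.Dict.mk row).getD "vendor_keys" "") ";").getD []).foldl
        (fun keys vendor_key =>
          if PySem.Str.strip vendor_key ≠ "" then PySem.Set.add keys (PySem.Str.strip vendor_key)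
          else keys)
        keys)
      = (fun keys row => PySem.Set.update keys (goodS (splitS ((PySem.Dict.mk row).getD "vendor_keys" "")))) := by
    funext ks row
    exact inner_eq ks _
  have hB : (fun (keys : PySem.Set String) (row : List (String × String)) =>
      (((((PySem.Dict.mk row).getD "vendor_keys" "").toList ++ [';']).foldl
          scanStep (keys, ([] : List Char))).1))
      = (fun keys row => PySem.Set.update keys (goodS (splitS ((PySem.Dict.mk row).getD "vendor_keys" "")))) := by
    funext ks row
    rw [row_eq]
  rw [hA, hB]
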